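-- pv_equiv track=rewrite | github.com/won6c/goorm_final_pjt | func_script/reg_capture_test.py | compare_registry_paths
-- ===== SOURCE A (Python) =====
-- def compare_registry_paths(capture1, capture2):
--     added = {key: capture2[key] for key in capture2 if key not in capture1}
--     deleted = {key: capture1[key] for key in capture1 if key not in capture2}
--     modified = {
--         key: {"old": capture1[key], "new": capture2[key]}
--         for key in capture1
--         if key in capture2 and capture1[key] != capture2[key]
--     }
--
--     return added, modified, deleted
-- ===== SOURCE B (Python) =====
-- _MISSING = object()
--
-- def compare_registry_paths(capture1, capture2):
--     # Destructive dict subtraction: start from a copy of capture2 and pop each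
--     # of capture1's keys out of it; what survives is `added`, and each pop's
--     # outcome classifies the capture1 entry as deleted or (when changed) modified.
--     added = dict(capture2)
--     deleted = {}
--     modified = {}
--     for key, old in capture1.items():
--         new = added.pop(key, _MISSING)
--         if new is _MISSING:
--             deleted[key] = old
--         elif old != new:
--             modified[key] = {"old": old, "new": new}
--     return added, modified, deleted
-- ===== Notes on version B (the rewrite author's own statement) =====
-- stated objective: alternative
-- what changed: Replaces A's three membership-filtered comprehensions over the full dicts by destructive dict subtraction: B copies capture2 and pops each capture1 key out of it in a single pass, so the surviving copy IS added and each pop's outcome (missing / present-equal / present-different) classifies the capture1 entry as deleted, unchanged or modified, with no membership tests at all.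
import Mathlib
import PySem

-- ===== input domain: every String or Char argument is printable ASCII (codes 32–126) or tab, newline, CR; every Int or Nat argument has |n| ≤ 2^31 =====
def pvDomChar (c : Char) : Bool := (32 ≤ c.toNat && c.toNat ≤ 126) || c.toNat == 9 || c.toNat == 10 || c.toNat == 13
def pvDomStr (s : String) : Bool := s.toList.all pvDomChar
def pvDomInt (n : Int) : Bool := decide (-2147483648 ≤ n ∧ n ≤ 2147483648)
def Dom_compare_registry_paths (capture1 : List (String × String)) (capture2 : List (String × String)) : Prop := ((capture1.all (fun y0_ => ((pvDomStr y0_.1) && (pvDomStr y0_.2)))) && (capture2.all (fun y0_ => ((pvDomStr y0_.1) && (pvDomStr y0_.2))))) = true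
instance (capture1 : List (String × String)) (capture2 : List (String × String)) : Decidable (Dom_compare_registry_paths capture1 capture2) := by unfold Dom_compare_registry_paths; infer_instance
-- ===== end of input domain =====

-- B replaces A's three membership-filtered comprehensions by destructive dict subtraction: pop each
-- capture1 key out of a copy of capture2; the survivors are `added`, each pop classifies the entry
-- (alternative decomposition; not faster).

-- ===== PORT A =====
-- A iterates dict keys ('for key in capture2') and indexes ('capture2[key]'): keys/getD over the dicts.
def compare_registry_paths (capture1 : List (String × String)) (capture2 : List (String × String)) : (List (String × String)) × (List (String × List (String × String))) × (List (String × String)) :=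
  let d1 := PySem.Dict.ofList capture1
  let d2 := PySem.Dict.ofList capture2
  let added := (d2.keys.filter (fun k => !d1.contains k)).map (fun k => (k, d2.getD k ""))
  let deleted := (d1.keys.filter (fun k => !d2.contains k)).map (fun k => (k, d1.getD k ""))
  let modified := (d1.keys.filter (fun k => d2.contains k && d1.getD k "" != d2.getD k "")).map
      (fun k => (k, [("old", d1.getD k ""), ("new", d2.getD k "")]))
  (added, modified, deleted)

-- ===== PORT B =====
-- the body of B's loop: 'new = added.pop(key, _MISSING)' followed by the classification
def pvStepB (acc : PySem.Dict String String × PySem.Dict String String × PySem.Dict String (List (String × String)))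
    (p : String × String) : PySem.Dict String String × PySem.Dict String String × PySem.Dict String (List (String × String)) :=
  match acc.1.pop? p.1 with
  | none => (acc.1, acc.2.1.insert p.1 p.2, acc.2.2)
  | some (w, rest) =>
      (rest, acc.2.1, if p.2 != w then acc.2.2.insert p.1 [("old", p.2), ("new", w)] else acc.2.2)

def compare_registry_paths_alt (capture1 : List (String × String)) (capture2 : List (String × String)) : (List (String × String)) × (List (String × List (String × String))) × (List (String × String)) :=
  let d1 := PySem.Dict.ofList capture1
  let st := d1.items.foldl pvStepB
    (PySem.Dict.ofList capture2, (PySem.Dict.empty : PySem.Dict String String),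
     (PySem.Dict.empty : PySem.Dict String (List (String × String))))
  (st.1.items, st.2.2.items, st.2.1.items)

-- ===== PRECONDITION & SPEC =====
def Spec_compare_registry_paths (capture1 : List (String × String)) (capture2 : List (String × String)) (out : (List (String × String)) × (List (String × List (String × String))) × (List (String × String))) : Prop := out = compare_registry_paths_alt capture1 capture2
instance (capture1 : List (String × String)) (capture2 : List (String × String)) (out : (List (String × String)) × (List (String × List (String × String))) × (List (String × String))) : Decidable (Spec_compare_registry_paths capture1 capture2 out) := by unfold Spec_compare_registry_paths; infer_instance

-- ===== CLAIM (what is proved, stated in full; the proofs are below) =====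
def Claim_equal_compare_registry_paths : Prop := ∀ (capture1 : List (String × String)) (capture2 : List (String × String)), Dom_compare_registry_paths capture1 capture2 → Spec_compare_registry_paths capture1 capture2 (compare_registry_paths capture1 capture2)

-- ===== LEMMAS AND PROOFS =====

-- erase of an absent key is the identity
theorem pv_erase_of_get?_none {κ ν : Type} [BEq κ] (d : PySem.Dict κ ν) (k : κ)
    (h : d.get? k = none) : d.erase k = d := by
  have hall : ∀ p ∈ d.items, (!(p.1 == k)) = true := by
    have h' : ∀ (a : κ) (b : ν), (a, b) ∈ d.items → (a == k) = false := by
      simpa [PySem.Dict.get?] using h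
    intro p hp
    simpa using h' p.1 p.2 hp
  simp [PySem.Dict.erase, List.filter_eq_self.mpr hall]

-- lookups at other keys pass through erase
theorem pv_get?_erase_of_ne {κ ν : Type} [BEq κ] [LawfulBEq κ] (d : PySem.Dict κ ν) (k k' : κ)
    (h : k' ≠ k) : (d.erase k).get? k' = d.get? k' := by
  simp only [PySem.Dict.get?, PySem.Dict.erase]
  rw [List.find?_filter]
  have hpred : (fun a : κ × ν => decide ((!(a.1 == k)) = true ∧ (a.1 == k') = true))
      = fun p : κ × ν => p.1 == k' := by
    funext p
    by_cases hp : p.1 = k' <;> simp [hp, h]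
  rw [hpred]

-- B's fused pop-loop, characterised against the fixed reference dict d2
theorem pv_fold_pop (d2 : PySem.Dict String String) (l : List (String × String))
    (hl : (l.map Prod.fst).Nodup)
    (a : PySem.Dict String String) (dl : PySem.Dict String String)
    (m : PySem.Dict String (List (String × String)))
    (ha : ∀ p ∈ l, a.get? p.1 = d2.get? p.1) :
    l.foldl pvStepB (a, dl, m) =
      (l.foldl (fun d p => d.erase p.1) a,
       (l.filter (fun p => (d2.get? p.1).isNone)).foldl (fun d p => d.insert p.1 p.2) dl,
       (l.filter (fun p => match d2.get? p.1 with | some w => p.2 != w | none => false)).foldl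
         (fun d p => d.insert p.1 [("old", p.2), ("new", (d2.get? p.1).getD "")]) m) := by
  induction l generalizing a dl m with
  | nil => simp
  | cons p t ih =>
    have hp : a.get? p.1 = d2.get? p.1 := ha p (by simp)
    have ht : (t.map Prod.fst).Nodup := (List.nodup_cons.mp hl).2
    have hpf : p.1 ∉ t.map Prod.fst := (List.nodup_cons.mp hl).1
    rw [List.foldl_cons]
    cases hg : d2.get? p.1 with
    | none =>
      have hstep : pvStepB (a, dl, m) p = (a, dl.insert p.1 p.2, m) := by
        simp [pvStepB, PySem.Dict.pop?, hp, hg]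
      rw [hstep, ih ht _ _ _ (fun q hq => ha q (by simp [hq]))]
      have hea : a.erase p.1 = a := pv_erase_of_get?_none a p.1 (hp.trans hg)
      simp [hg, hea]
    | some w =>
      have ha' : ∀ q ∈ t, (a.erase p.1).get? q.1 = d2.get? q.1 := by
        intro q hq
        have hne : q.1 ≠ p.1 := by
          intro he; exact hpf (he ▸ List.mem_map_of_mem hq)
        rw [pv_get?_erase_of_ne a p.1 q.1 hne]; exact ha q (by simp [hq])
      by_cases hv : p.2 = w
      · have hstep : pvStepB (a, dl, m) p = (a.erase p.1, dl, m) := by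
          simp [pvStepB, PySem.Dict.pop?, hp, hg, hv]
        rw [hstep, ih ht _ _ _ ha']
        simp [hg, hv]
      · have hstep : pvStepB (a, dl, m) p
            = (a.erase p.1, dl, m.insert p.1 [("old", p.2), ("new", w)]) := by
          simp [pvStepB, PySem.Dict.pop?, hp, hg, hv]
        rw [hstep, ih ht _ _ _ ha']
        simp [hg, hv]

-- a fold of erases is one filter over the items
theorem pv_items_fold_erase (ks : List (String × String)) (d : PySem.Dict String String) :
    (ks.foldl (fun d p => d.erase p.1) d).items
      = d.items.filter (fun q => !(ks.map Prod.fst).contains q.1) := by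
  induction ks generalizing d with
  | nil => simp
  | cons k t ih =>
    rw [List.foldl_cons, ih]
    simp only [PySem.Dict.erase, List.filter_filter]
    apply List.filter_congr
    intro q _
    by_cases h : q.1 = k.1 <;> simp [h, Bool.and_comm]

-- inserts of distinct fresh keys starting from empty just list the entries
theorem pv_items_inserts_empty {ν : Type} (l : List (String × String)) (v : String × String → ν)
    (hl : (l.map Prod.fst).Nodup) :
    (l.foldl (fun d p => d.insert p.1 (v p)) (PySem.Dict.empty : PySem.Dict String ν)).items
      = l.map (fun p => (p.1, v p)) := by
  have := PySem.Dict.items_foldl_insert_fresh (d := (PySem.Dict.empty : PySem.Dict String ν))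
    (l := l) (k := Prod.fst) (v := v) (by intro a _; simp) hl
  simpa using this

-- ===== VERDICT (by name: the statement is the Claim_ definition above) =====
theorem compare_registry_paths_spec : Claim_equal_compare_registry_paths := by
  intro c1 c2 _
  unfold Spec_compare_registry_paths compare_registry_paths compare_registry_paths_alt
  dsimp only
  have hnd1 : (PySem.Dict.ofList c1).keys.Nodup := PySem.Dict.nodup_keys_ofList c1
  have hnd2 : (PySem.Dict.ofList c2).keys.Nodup := PySem.Dict.nodup_keys_ofList c2
  rw [pv_fold_pop (PySem.Dict.ofList c2) _ hnd1 _ _ _ (fun _ _ => rfl)]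
  dsimp only
  have hnfD : ((((PySem.Dict.ofList c1).items.filter
      (fun p => ((PySem.Dict.ofList c2).get? p.1).isNone)).map Prod.fst)).Nodup :=
    hnd1.sublist (List.filter_sublist.map Prod.fst)
  have hnfM : ((((PySem.Dict.ofList c1).items.filter
      (fun p => match (PySem.Dict.ofList c2).get? p.1 with
                | some w => p.2 != w | none => false)).map Prod.fst)).Nodup :=
    hnd1.sublist (List.filter_sublist.map Prod.fst)
  rw [pv_items_fold_erase, pv_items_inserts_empty _ _ hnfD, pv_items_inserts_empty _ _ hnfM]
  rw [PySem.Dict.items_eq_map_keys (PySem.Dict.ofList c2) hnd2 "",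
      PySem.Dict.items_eq_map_keys (PySem.Dict.ofList c1) hnd1 ""]
  simp only [List.filter_map, List.map_map]
  refine Prod.ext ?_ (Prod.ext ?_ ?_) <;> dsimp only
  · -- added
    congr 1
    apply List.filter_congr
    intro k _
    simp [Function.comp_def, PySem.Dict.contains_eq_decide_mem_keys, PySem.Dict.keys]
  · -- modified
    have hf : (fun k => (match (PySem.Dict.ofList c2).get? k with
          | some w => (PySem.Dict.ofList c1).getD k "" != w | none => false : Bool))
        = fun k => (PySem.Dict.ofList c2).contains k &&
            (PySem.Dict.ofList c1).getD k "" != (PySem.Dict.ofList c2).getD k "" := by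
      funext k
      rcases hg : (PySem.Dict.ofList c2).get? k with _ | w
      · simp [hg, PySem.Dict.contains_eq_isSome_get?]
      · simp [hg, PySem.Dict.contains_eq_isSome_get?, PySem.Dict.getD_eq_get?_getD]
    have hv : (fun k => ((k, (PySem.Dict.ofList c1).getD k "").1,
          [("old", (k, (PySem.Dict.ofList c1).getD k "").2),
           ("new", ((PySem.Dict.ofList c2).get? (k, (PySem.Dict.ofList c1).getD k "").1).getD "")]))
        = fun k => (k, [("old", (PySem.Dict.ofList c1).getD k ""),
                        ("new", (PySem.Dict.ofList c2).getD k "")]) := by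
      funext k
      simp [PySem.Dict.getD_eq_get?_getD]
    simp only [Function.comp_def, hv]
    congr 1
    apply List.filter_congr
    intro k _
    exact (congrFun hf k).symm
  · -- deleted
    congr 1
    apply List.filter_congr
    intro k _
    simp [PySem.Dict.contains_eq_isSome_get?]
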